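-- pv_equiv track=rewrite | github.com/CharlesCNorton/AI-Bootstrap | refuted-unlikely-incomplete-mundane/Shifted-pythagorean/tests/test6b.py | get_solutions_for_z
-- ===== SOURCE A (Python) =====
-- from math import sqrt, isqrt
-- from typing import Set, Tuple, List, Dict
--
-- def get_solutions_for_z(z: int) -> List[Tuple[int, int]]:
--     """Get all solutions for a z-value"""
--     solutions = []
--     z_squared_plus_1 = z*z + 1
--     max_x = isqrt(z_squared_plus_1 - 1)
--
--     for x in range(2, max_x + 1):
--         y_squared = z_squared_plus_1 - x*x
--         if y_squared > 0:
--             y = isqrt(y_squared)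
--             if y*y == y_squared and y > x:
--                 solutions.append((x, y))
--
--     return sorted(solutions)
-- ===== SOURCE B (Python) =====
-- from math import isqrt
--
--
-- def get_solutions_for_z(z: int):
--     """Two-pointer scan: x walks up from 2, y walks down from isqrt(z*z+1);
--     emits the solutions of x*x + y*y == z*z + 1 with x < y in increasing-x
--     order, using a single isqrt and no sort."""
--     n = z * z + 1
--     x, y = 2, isqrt(n)
--     out = []
--     while x < y:
--         s = x * x + y * y
--         if s == n:
--             out.append((x, y))
--             x += 1
--             y -= 1
--         elif s < n:
--             x += 1
--         else:
--             y -= 1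
--     return out
-- ===== Notes on version B (the rewrite author's own statement) =====
-- stated objective: alternative
-- what changed: Replaces A's scan that runs an isqrt-and-perfect-square test on every candidate x and then sorts, by a two-pointer sweep (x up from the smallest candidate, y down from isqrt(z*z+1)) that uses one isqrt in total and emits the solutions already in increasing order, so no sort is needed.
import Mathlib
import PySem

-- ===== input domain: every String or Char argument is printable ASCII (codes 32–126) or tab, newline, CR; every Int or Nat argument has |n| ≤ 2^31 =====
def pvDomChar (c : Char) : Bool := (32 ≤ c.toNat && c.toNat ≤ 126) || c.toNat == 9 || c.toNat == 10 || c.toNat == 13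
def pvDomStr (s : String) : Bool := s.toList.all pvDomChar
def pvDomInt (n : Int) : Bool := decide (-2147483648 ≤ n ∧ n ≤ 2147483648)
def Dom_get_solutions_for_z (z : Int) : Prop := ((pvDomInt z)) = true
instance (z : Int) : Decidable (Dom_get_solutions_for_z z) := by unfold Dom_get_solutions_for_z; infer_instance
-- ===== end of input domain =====

-- B replaces A's per-candidate isqrt-and-square test plus final sort by a two-pointer
-- sweep (x up from 2, y down from isqrt(z*z+1)) that emits the solutions already in order.

-- math.isqrt, exact for 0 ≤ i (both programs only apply it to nonnegative arguments)
def pyIsqrt (i : Int) : Int := ((Int.toNat i).sqrt : Int)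

-- ===== PORT A =====
def get_solutions_for_z (z : Int) : List (Int × Int) :=
  let zSquaredPlus1 := z * z + 1
  let maxX := pyIsqrt (zSquaredPlus1 - 1)
  let solutions := (PySem.List.pyRange 2 (maxX + 1) 1).foldl (fun acc x =>
      let ySquared := zSquaredPlus1 - x * x
      if ySquared > 0 then
        let y := pyIsqrt ySquared
        if y * y = ySquared ∧ y > x then acc ++ [(x, y)] else acc
      else acc) []
  PySem.List.sorted2 solutions Prod.fst Prod.snd

-- ===== PORT B =====
-- the while loop of Source B, as recursion on the shrinking gap y - x
def twoPointer (n x y : Int) : List (Int × Int) :=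
  if _h : x < y then
    if x * x + y * y = n then (x, y) :: twoPointer n (x + 1) (y - 1)
    else if x * x + y * y < n then twoPointer n (x + 1) y
    else twoPointer n x (y - 1)
  else []
termination_by (y - x).toNat
decreasing_by all_goals omega

def get_solutions_for_z_alt (z : Int) : List (Int × Int) :=
  let n := z * z + 1
  twoPointer n 2 (pyIsqrt n)

-- ===== PRECONDITION & SPEC =====
def Spec_get_solutions_for_z (z : Int) (out : List (Int × Int)) : Prop := out = get_solutions_for_z_alt z
instance (z : Int) (out : List (Int × Int)) : Decidable (Spec_get_solutions_for_z z out) := by unfold Spec_get_solutions_for_z; infer_instance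

-- ===== CLAIM (what is proved, stated in full; the proofs are below) =====
def Claim_equal_get_solutions_for_z : Prop := ∀ (z : Int), Dom_get_solutions_for_z z → Spec_get_solutions_for_z z (get_solutions_for_z z)

-- ===== LEMMAS AND PROOFS =====

-- basic facts about pyIsqrt
theorem pyIsqrt_eq_of_sq {b i : Int} (hb : 0 ≤ b) (h : b * b = i) : pyIsqrt i = b := by
  unfold pyIsqrt
  have hbb : i = ((b.toNat * b.toNat : Nat) : Int) := by
    push_cast [Int.toNat_of_nonneg hb]; omega
  have : i.toNat = b.toNat * b.toNat := by omega
  rw [this, Nat.sqrt_eq]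
  exact Int.toNat_of_nonneg hb

theorem pyIsqrt_mono {i j : Int} (hij : i ≤ j) : pyIsqrt i ≤ pyIsqrt j := by
  unfold pyIsqrt
  have : i.toNat ≤ j.toNat := by omega
  exact_mod_cast Nat.sqrt_le_sqrt this

-- the solution predicate both programs compute
def IsSol (n a b : Int) : Prop := 2 ≤ a ∧ a < b ∧ a * a + b * b = n

-- membership in B's two-pointer output
theorem mem_twoPointer (n x y : Int) (hx : 2 ≤ x) (p : Int × Int) :
    p ∈ twoPointer n x y ↔ x ≤ p.1 ∧ p.2 ≤ y ∧ p.1 < p.2 ∧ p.1 * p.1 + p.2 * p.2 = n := by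
  revert hx p
  fun_induction twoPointer n x y with
  | case1 x y h heq ih =>
    intro hx p
    have ih := ih (by omega)
    rw [List.mem_cons, ih p]
    constructor
    · rintro (rfl | ⟨h1, h2, h3, h4⟩)
      · exact ⟨le_refl _, le_refl _, h, heq⟩
      · exact ⟨by omega, by omega, h3, h4⟩
    · rintro ⟨h1, h2, h3, h4⟩
      by_cases ha : p.1 = x
      · left
        have hb : p.2 * p.2 = y * y := by nlinarith
        have : p.2 = y := by nlinarith
        exact Prod.ext ha this
      · right
        refine ⟨by omega, ?_, h3, h4⟩
        have hxx : x * x < p.1 * p.1 :=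
          mul_self_lt_mul_self (by omega) (by omega)
        have hyy : p.2 * p.2 < y * y := by nlinarith
        nlinarith
  | case2 x y h hne hlt ih =>
    intro hx p
    have ih := ih (by omega)
    rw [ih p]
    constructor
    · rintro ⟨h1, h2, h3, h4⟩; exact ⟨by omega, h2, h3, h4⟩
    · rintro ⟨h1, h2, h3, h4⟩
      refine ⟨?_, h2, h3, h4⟩
      by_cases ha : p.1 = x
      · exfalso
        have hyy : p.2 * p.2 ≤ y * y :=
          mul_self_le_mul_self (by omega) h2
        rw [ha] at h4
        omega
      · omega
  | case3 x y h hne hge ih =>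
    intro hx p
    have ih := ih hx
    rw [ih p]
    constructor
    · rintro ⟨h1, h2, h3, h4⟩; exact ⟨h1, by omega, h3, h4⟩
    · rintro ⟨h1, h2, h3, h4⟩
      refine ⟨h1, ?_, h3, h4⟩
      by_cases hb : p.2 = y
      · exfalso
        have hxx : x * x ≤ p.1 * p.1 :=
          mul_self_le_mul_self (by omega) h1
        rw [hb] at h4
        omega
      · omega
  | case4 x y h =>
    intro hx p
    simp only [List.not_mem_nil, false_iff]
    rintro ⟨h1, h2, h3, h4⟩; omega

-- first components strictly increase along B's output
theorem pairwise_twoPointer (n x y : Int) (hx : 2 ≤ x) :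
    (twoPointer n x y).Pairwise (fun p q => p.1 < q.1) := by
  revert hx
  fun_induction twoPointer n x y with
  | case1 x y h heq ih =>
    intro hx
    refine List.pairwise_cons.mpr ⟨?_, ih (by omega)⟩
    intro q hq
    have hm := (mem_twoPointer n (x + 1) (y - 1) (by omega) q).mp hq
    show x < q.1
    omega
  | case2 x y h hne hlt ih => intro hx; exact ih (by omega)
  | case3 x y h hne hge ih => intro hx; exact ih hx
  | case4 x y h => intro hx; exact List.Pairwise.nil

-- A's loop, as a filter-map over the range
theorem solsA_eq (z : Int) :
    (PySem.List.pyRange 2 (pyIsqrt (z * z + 1 - 1) + 1) 1).foldl (fun acc x =>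
      let ySquared := z * z + 1 - x * x
      if ySquared > 0 then
        let y := pyIsqrt ySquared
        if y * y = ySquared ∧ y > x then acc ++ [(x, y)] else acc
      else acc) []
    = ((PySem.List.pyRange 2 (pyIsqrt (z * z) + 1) 1).filter (fun x =>
        decide (0 < z * z + 1 - x * x ∧
          pyIsqrt (z * z + 1 - x * x) * pyIsqrt (z * z + 1 - x * x) = z * z + 1 - x * x ∧
          x < pyIsqrt (z * z + 1 - x * x)))).map (fun x => (x, pyIsqrt (z * z + 1 - x * x))) := by
  rw [show z * z + 1 - 1 = z * z by ring]
  have hc := PySem.List.foldl_congr_mem (PySem.List.pyRange 2 (pyIsqrt (z * z) + 1))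
    (fun acc x =>
      let ySquared := z * z + 1 - x * x
      if ySquared > 0 then
        let y := pyIsqrt ySquared
        if y * y = ySquared ∧ y > x then acc ++ [(x, y)] else acc
      else acc)
    (fun acc x => if (0 < z * z + 1 - x * x ∧
          pyIsqrt (z * z + 1 - x * x) * pyIsqrt (z * z + 1 - x * x) = z * z + 1 - x * x ∧
          x < pyIsqrt (z * z + 1 - x * x)) then acc ++ [(x, pyIsqrt (z * z + 1 - x * x))] else acc)
    [] ?_
  · rw [hc, PySem.List.foldl_append_ite]
    simp
  · intro acc x _
    simp only [gt_iff_lt]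
    split_ifs with h1 h2 h3 <;> first | rfl | (exfalso; tauto)


-- membership in A's (unsorted) solution list
theorem mem_solsA (z : Int) (p : Int × Int) :
    p ∈ ((PySem.List.pyRange 2 (pyIsqrt (z * z) + 1) 1).filter (fun x =>
        decide (0 < z * z + 1 - x * x ∧
          pyIsqrt (z * z + 1 - x * x) * pyIsqrt (z * z + 1 - x * x) = z * z + 1 - x * x ∧
          x < pyIsqrt (z * z + 1 - x * x)))).map (fun x => (x, pyIsqrt (z * z + 1 - x * x)))
    ↔ IsSol (z * z + 1) p.1 p.2 := by
  unfold IsSol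
  simp only [List.mem_map, List.mem_filter, PySem.List.mem_pyRange_one, decide_eq_true_eq]
  constructor
  · rintro ⟨x, ⟨⟨hx2, _⟩, hd, hsq, hlt⟩, rfl⟩
    exact ⟨hx2, hlt, by nlinarith⟩
  · rintro ⟨h2a, hab, hsum⟩
    refine ⟨p.1, ⟨⟨h2a, ?_⟩, ?_, ?_, ?_⟩, ?_⟩
    · -- p.1 < pyIsqrt (z * z) + 1
      have hsq : pyIsqrt (p.1 * p.1) = p.1 := pyIsqrt_eq_of_sq (by omega) rfl
      have hlt : p.1 * p.1 < p.2 * p.2 := mul_self_lt_mul_self (by omega) hab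
      have hle : p.1 * p.1 ≤ z * z := by nlinarith
      have := pyIsqrt_mono hle
      omega
    · have hb : p.2 * p.2 = z * z + 1 - p.1 * p.1 := by omega
      nlinarith
    · have hb : p.2 * p.2 = z * z + 1 - p.1 * p.1 := by omega
      rw [pyIsqrt_eq_of_sq (by omega) hb]
      omega
    · have hb : p.2 * p.2 = z * z + 1 - p.1 * p.1 := by omega
      rw [pyIsqrt_eq_of_sq (by omega) hb]
      omega
    · have hb : p.2 * p.2 = z * z + 1 - p.1 * p.1 := by omega
      rw [pyIsqrt_eq_of_sq (by omega) hb]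

theorem pairwise_solsA (z : Int) :
    (((PySem.List.pyRange 2 (pyIsqrt (z * z) + 1) 1).filter (fun x =>
        decide (0 < z * z + 1 - x * x ∧
          pyIsqrt (z * z + 1 - x * x) * pyIsqrt (z * z + 1 - x * x) = z * z + 1 - x * x ∧
          x < pyIsqrt (z * z + 1 - x * x)))).map (fun x => (x, pyIsqrt (z * z + 1 - x * x)))).Pairwise
      (fun p q => p.1 < q.1) := by
  exact List.Pairwise.map _ (fun a b h => h)
    (List.Pairwise.filter _ (PySem.List.pairwise_lt_pyRange_one 2 (pyIsqrt (z * z) + 1)))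

-- two strictly-fst-increasing lists with the same elements are equal
theorem eq_of_mem_iff_pairwise_lt_fst :
    ∀ (l₁ l₂ : List (Int × Int)), (∀ p, p ∈ l₁ ↔ p ∈ l₂) →
      l₁.Pairwise (fun p q => p.1 < q.1) → l₂.Pairwise (fun p q => p.1 < q.1) → l₁ = l₂ := by
  intro l₁ l₂ hmem h1 h2
  have nd1 : l₁.Nodup := h1.imp (fun h => by intro he; rw [he] at h; omega)
  have nd2 : l₂.Nodup := h2.imp (fun h => by intro he; rw [he] at h; omega)
  have hperm : l₁.Perm l₂ := (List.perm_ext_iff_of_nodup nd1 nd2).mpr hmem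
  exact List.Perm.eq_of_pairwise (fun a b _ _ hab hba => by omega) h1 h2 hperm

-- a fold of insertBy over an already strictly ordered list appends in order
theorem foldl_insertBy_eq_append {α : Type} (before : α → α → Bool) :
    ∀ (xs acc : List α), (∀ x ∈ xs, ∀ y ∈ acc, before x y = false) →
      xs.Pairwise (fun a b => before b a = false) →
      xs.foldl (fun acc x => PySem.List.insertBy before x acc) acc = acc ++ xs := by
  intro xs
  induction xs with
  | nil => intro acc _ _; simp
  | cons x t ih =>
    intro acc hacc hpw
    simp only [List.foldl_cons]
    rw [PySem.List.insertBy_of_forall_not_before before x acc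
      (fun y hy => hacc x (by simp) y hy)]
    rw [ih (acc ++ [x]) ?_ (List.Pairwise.of_cons hpw)]
    · simp
    · intro a ha y hy
      rcases List.mem_append.mp hy with h | h
      · exact hacc a (by simp [ha]) y h
      · simp at h; subst h
        exact (List.pairwise_cons.mp hpw).1 a ha

-- sorted2 by (fst, snd) of a strictly-fst-increasing list is itself
theorem sorted2_eq_self (xs : List (Int × Int)) (h : xs.Pairwise (fun p q => p.1 < q.1)) :
    PySem.List.sorted2 xs Prod.fst Prod.snd = xs := by
  show xs.foldl (fun acc x => PySem.List.insertBy _ x acc) [] = xs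
  rw [foldl_insertBy_eq_append _ xs [] (by simp) ?_]
  · simp
  · refine h.imp (fun hlt => ?_)
    simp only [Bool.false_eq_true, if_false, Bool.or_eq_false_iff, Bool.and_eq_false_iff,
      decide_eq_false_iff_not, Bool.not_eq_false', decide_eq_true_eq]
    exact ⟨by omega, Or.inl hlt⟩

-- ===== VERDICT (by name: the statement is the Claim_ definition above) =====
theorem get_solutions_for_z_spec : Claim_equal_get_solutions_for_z := by
  intro z _
  unfold Spec_get_solutions_for_z get_solutions_for_z get_solutions_for_z_alt
  simp only []
  rw [solsA_eq]
  rw [sorted2_eq_self _ (pairwise_solsA z)]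
  refine eq_of_mem_iff_pairwise_lt_fst _ _ ?_ (pairwise_solsA z)
    (pairwise_twoPointer (z * z + 1) 2 (pyIsqrt (z * z + 1)) (by norm_num))
  intro p
  rw [mem_solsA, mem_twoPointer _ _ _ (le_refl 2)]
  unfold IsSol
  constructor
  · rintro ⟨h2a, hab, hsum⟩
    refine ⟨h2a, ?_, hab, hsum⟩
    have h1 : p.2 * p.2 ≤ z * z + 1 := by nlinarith
    have h2 : pyIsqrt (p.2 * p.2) = p.2 := pyIsqrt_eq_of_sq (by omega) rfl
    have := pyIsqrt_mono h1
    omega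
  · rintro ⟨h1, h2, h3, h4⟩
    exact ⟨h1, h3, h4⟩
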